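-- pv_equiv track=rewrite | github.com/michaelbuzzetta/CS115 | Homeworks/hw2.py | scoreListHelper
-- ===== SOURCE A (Python) =====
-- scrabbleScores = \
--    [ ['a', 1], ['b', 3], ['c', 3], ['d', 2], ['e', 1], ['f', 4], ['g', 2],
--      ['h', 4], ['i', 1], ['j', 8], ['k', 5], ['l', 1], ['m', 3], ['n', 1],
--      ['o', 1], ['p', 3], ['q', 10], ['r', 1], ['s', 1], ['t', 1], ['u', 1],
--      ['v', 4], ['w', 4], ['x', 8], ['y', 4], ['z', 10] ]
--
-- def letterScore(letter, scorelist):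
--     if scorelist[0][0] == letter:
--         return scorelist[0][1]
--     return letterScore(letter,scorelist[1:])
--
-- def wordScore(S, scorelist):
--     if S == "":
--         return 0
--     return letterScore(S[0],scorelist) + wordScore(S[1:],scorelist)
--
-- def wordMake(letters, word):
--     if word=="":
--         return True
--     else:
--         if (word[0] in letters):
--             index = letters.index(word[0])
--             letters=letters[0:index]+letters[index+1:]
--             return(wordMake(letters,word[1:]))
--         else:
--             return False
--
-- def scoreListHelper(Rack, dictionary):
--     if Rack ==[]:
--         return[]
--
--     if dictionary==[]:
--         return []
--     else:
--         if wordMake(Rack, dictionary[0]):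
--             x=dictionary[0]
--             return [[x, wordScore(x,scrabbleScores)]]+scoreListHelper(Rack,dictionary[1:])
--         else:
--             return scoreListHelper(Rack,dictionary[1:])
-- ===== SOURCE B (Python) =====
-- # Simpler: one comprehension with a count-based multiset test and a dict-table score,
-- # replacing A's three mutually recursive scans.
-- SCORES = {'a': 1, 'b': 3, 'c': 3, 'd': 2, 'e': 1, 'f': 4, 'g': 2,
--           'h': 4, 'i': 1, 'j': 8, 'k': 5, 'l': 1, 'm': 3, 'n': 1,
--           'o': 1, 'p': 3, 'q': 10, 'r': 1, 's': 1, 't': 1, 'u': 1,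
--           'v': 4, 'w': 4, 'x': 8, 'y': 4, 'z': 10}
--
-- def scoreListHelper(Rack, dictionary):
--     if Rack == []:
--         return []
--     return [[w, sum(SCORES[c] for c in w)]
--             for w in dictionary
--             if all(list(w).count(c) <= Rack.count(c) for c in set(w))]
-- ===== Notes on version B (the rewrite author's own statement) =====
-- stated objective: simpler
-- what changed: Replaces A's three recursive scans (greedy letter-removal wordMake, recursive letterScore/wordScore over the 26-pair list, and a recursion over the dictionary) by a single list comprehension with a count-based multiset-containment test and a dict score table.
import Mathlib
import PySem

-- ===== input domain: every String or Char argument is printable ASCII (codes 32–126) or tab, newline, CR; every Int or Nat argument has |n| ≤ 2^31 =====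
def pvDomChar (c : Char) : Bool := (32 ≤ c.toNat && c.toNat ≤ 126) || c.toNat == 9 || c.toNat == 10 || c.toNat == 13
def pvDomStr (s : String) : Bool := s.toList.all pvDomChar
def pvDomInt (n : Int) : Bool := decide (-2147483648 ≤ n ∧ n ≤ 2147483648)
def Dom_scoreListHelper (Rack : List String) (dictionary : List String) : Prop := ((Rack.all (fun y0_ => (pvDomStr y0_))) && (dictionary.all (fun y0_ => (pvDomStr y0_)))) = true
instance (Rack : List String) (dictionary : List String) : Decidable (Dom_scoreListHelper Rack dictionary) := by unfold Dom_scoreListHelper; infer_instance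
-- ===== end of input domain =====

-- B replaces A's three recursive scans by one comprehension with a count-based multiset
-- test and a dict score table (objective: simpler).

-- ===== PORT A =====
def scrabbleScoresA : List (String × Int) :=
  [("a",1),("b",3),("c",3),("d",2),("e",1),("f",4),("g",2),
   ("h",4),("i",1),("j",8),("k",5),("l",1),("m",3),("n",1),
   ("o",1),("p",3),("q",10),("r",1),("s",1),("t",1),("u",1),
   ("v",4),("w",4),("x",8),("y",4),("z",10)]

def letterScore (letter : String) (scorelist : List (String × Int)) : Int :=
  match scorelist with
  | [] => 0  -- Python raises IndexError here (scorelist[0] on []); excluded by Pre_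
  | p :: rest => if p.1 == letter then p.2 else letterScore letter rest

def wordScoreL (cs : List Char) (scorelist : List (String × Int)) : Int :=
  match cs with
  | [] => 0
  | c :: rest => letterScore (String.singleton c) scorelist + wordScoreL rest scorelist

def wordScore (S : String) (scorelist : List (String × Int)) : Int :=
  wordScoreL S.toList scorelist

def wordMakeL (letters : List String) (w : List Char) : Bool :=
  match w with
  | [] => true
  | c :: rest =>
    if String.singleton c ∈ letters then
      match PySem.List.index? letters (String.singleton c) with
      | some index =>
          wordMakeL (PySem.List.slice letters (some 0) (some (index : Int)) ++
                     PySem.List.slice letters (some ((index : Int) + 1)) none) rest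
      | none => false  -- unreachable: membership was just checked
    else false

def wordMake (letters : List String) (word : String) : Bool :=
  wordMakeL letters word.toList

def scoreListHelper (Rack : List String) (dictionary : List String) : List (String × Int) :=
  if Rack = [] then []
  else
    match dictionary with
    | [] => []
    | x :: rest =>
      if wordMake Rack x then (x, wordScore x scrabbleScoresA) :: scoreListHelper Rack rest
      else scoreListHelper Rack rest

-- ===== PORT B =====
def altScores : PySem.Dict String Int :=
  PySem.Dict.ofList
    [("a",1),("b",3),("c",3),("d",2),("e",1),("f",4),("g",2),
     ("h",4),("i",1),("j",8),("k",5),("l",1),("m",3),("n",1),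
     ("o",1),("p",3),("q",10),("r",1),("s",1),("t",1),("u",1),
     ("v",4),("w",4),("x",8),("y",4),("z",10)]

def canBuild (Rack : List String) (w : String) : Bool :=
  (PySem.Set.ofList w.toList).all fun c =>
    decide (w.toList.count c ≤ Rack.count (String.singleton c))

def altWordScore (w : String) : Int :=
  (w.toList.map fun c => (altScores.get? (String.singleton c)).getD 0).sum
  -- Python raises KeyError on a letter outside the table; excluded by Pre_

def scoreListHelper_alt (Rack : List String) (dictionary : List String) : List (String × Int) :=
  if Rack = [] then []
  else dictionary.filterMap fun w =>
    if canBuild Rack w then some (w, altWordScore w) else none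

-- ===== PRECONDITION & SPEC =====
-- Pre_ excludes exactly the inputs on which A raises (IndexError): some dictionary word is
-- buildable from the rack (count-wise) but contains a letter outside 'a'..'z', so
-- letterScore runs off the 26-entry table.  (B raises KeyError on the same inputs.)
def Pre_scoreListHelper (Rack : List String) (dictionary : List String) : Prop :=
  (dictionary.all fun w =>
    !(w.toList.all fun c => w.toList.count c ≤ Rack.count (String.singleton c)) ||
    (w.toList.all fun c => 97 ≤ c.toNat && c.toNat ≤ 122)) = true
instance (Rack : List String) (dictionary : List String) : Decidable (Pre_scoreListHelper Rack dictionary) := by unfold Pre_scoreListHelper; infer_instance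

def pvWitness_scoreListHelper : List String × List String :=
  (["a","t"], ["at", "b", ""])

def Spec_scoreListHelper (Rack : List String) (dictionary : List String) (out : List (String × Int)) : Prop := out = scoreListHelper_alt Rack dictionary
instance (Rack : List String) (dictionary : List String) (out : List (String × Int)) : Decidable (Spec_scoreListHelper Rack dictionary out) := by unfold Spec_scoreListHelper; infer_instance

-- ===== CLAIM (what is proved, stated in full; the proofs are below) =====
def Claim_equal_scoreListHelper : Prop := ∀ (Rack : List String) (dictionary : List String), Dom_scoreListHelper Rack dictionary → Pre_scoreListHelper Rack dictionary → Spec_scoreListHelper Rack dictionary (scoreListHelper Rack dictionary)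

-- ===== LEMMAS AND PROOFS =====

theorem singleton_injective : Function.Injective String.singleton := by
  intro a b h
  have := congrArg String.toList h
  simpa using this

-- A's recursive scan of the score list equals a first-match lookup in the same table.
theorem letterScore_eq_get? (sl : List (String × Int)) (letter : String) :
    letterScore letter sl = ((PySem.Dict.mk sl).get? letter).getD 0 := by
  induction sl with
  | nil => simp [letterScore, PySem.Dict.get?]
  | cons p rest ih =>
    obtain ⟨k, v⟩ := p
    rw [letterScore, PySem.Dict.get?_mk_cons]
    by_cases h : k == letter
    · simp [h]
    · simp [h, ih]

theorem altScores_eq_mk : altScores = PySem.Dict.mk scrabbleScoresA := by decide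

theorem wordScore_eq_alt (w : String) :
    wordScore w scrabbleScoresA = altWordScore w := by
  rw [wordScore, altWordScore]
  induction w.toList with
  | nil => simp [wordScoreL]
  | cons c rest ih =>
    rw [wordScoreL, ih, letterScore_eq_get?, ← altScores_eq_mk]
    simp

-- A's take/take-drop splice at the first index of s is exactly List.erase.
theorem splice_eq_erase (letters : List String) (s : String) (idx : Nat)
    (h : PySem.List.index? letters s = some idx) :
    PySem.List.slice letters (some 0) (some (idx : Int)) ++
      PySem.List.slice letters (some ((idx : Int) + 1)) none = letters.erase s := by
  rw [PySem.List.slice_zero_start, PySem.List.slice_to_natCast]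
  have : ((idx : Int) + 1) = ((idx + 1 : Nat) : Int) := by push_cast; ring
  rw [this, PySem.List.slice_from_natCast]
  rw [PySem.List.index?_eq_idxOf?] at h
  have hidx : letters.idxOf s = idx := by
    rw [List.idxOf_eq_getD_idxOf?, h]
    rfl
  rw [← hidx, ← List.eraseIdx_idxOf_eq_erase,
    List.eraseIdx_eq_take_drop_succ]

-- A's greedy first-occurrence removal succeeds iff the multiset count condition holds.
theorem wordMakeL_iff_counts (w : List Char) :
    ∀ letters : List String,
      wordMakeL letters w = true ↔
        ∀ x : String, (w.map String.singleton).count x ≤ letters.count x := by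
  induction w with
  | nil => intro letters; simp [wordMakeL]
  | cons c rest ih =>
    intro letters
    rw [wordMakeL]
    by_cases hmem : String.singleton c ∈ letters
    · rw [if_pos hmem]
      obtain ⟨idx, hidx⟩ := Option.isSome_iff_exists.mp
        ((PySem.List.index?_isSome_iff letters (String.singleton c)).mpr hmem)
      rw [hidx]
      dsimp only
      rw [splice_eq_erase letters _ idx hidx, ih]
      constructor
      · intro h x
        by_cases hx : x = String.singleton c
        · subst hx
          have h1 := h (String.singleton c)
          have hcnt : 1 ≤ letters.count (String.singleton c) :=
            List.count_pos_iff.mpr hmem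
          have h2 : ((letters.erase (String.singleton c)).count (String.singleton c))
              = letters.count (String.singleton c) - 1 := by
            simp [List.count_erase_self]
          simp only [List.map_cons, List.count_cons_self]
          omega
        · have h1 := h x
          rw [List.count_erase_of_ne hx] at h1
          have hx' : String.singleton c ≠ x := fun he => hx he.symm
          simpa [List.count_cons, hx'] using h1
      · intro h x
        by_cases hx : x = String.singleton c
        · subst hx
          have h1 := h (String.singleton c)
          simp only [List.map_cons, List.count_cons_self] at h1
          have h2 : ((letters.erase (String.singleton c)).count (String.singleton c))
              = letters.count (String.singleton c) - 1 := by
            simp [List.count_erase_self]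
          omega
        · have h1 := h x
          have hx' : String.singleton c ≠ x := fun he => hx he.symm
          simp only [List.map_cons, List.count_cons, beq_iff_eq] at h1
          rw [if_neg hx'] at h1
          rw [List.count_erase_of_ne hx]
          simpa using h1
    · rw [if_neg hmem]
      simp only [Bool.false_eq_true, false_iff, not_forall]
      refine ⟨String.singleton c, ?_⟩
      have h0 : letters.count (String.singleton c) = 0 :=
        List.count_eq_zero.mpr hmem
      simp [h0, List.count_cons_self]

-- the ∀-over-all-strings form matches B's per-letter count form
theorem counts_iff_perLetter (w : List Char) (letters : List String) :
    (∀ x : String, (w.map String.singleton).count x ≤ letters.count x) ↔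
      ∀ c ∈ w, w.count c ≤ letters.count (String.singleton c) := by
  constructor
  · intro h c _
    have := h (String.singleton c)
    rwa [List.count_map_of_injective _ _ singleton_injective] at this
  · intro h x
    by_cases hx : x ∈ w.map String.singleton
    · obtain ⟨c, hc, rfl⟩ := List.mem_map.mp hx
      rw [List.count_map_of_injective _ _ singleton_injective]
      exact h c hc
    · rw [List.count_eq_zero.mpr hx]
      exact Nat.zero_le _

theorem wordMake_eq_canBuild (Rack : List String) (w : String) :
    wordMake Rack w = canBuild Rack w := by
  have hA := wordMakeL_iff_counts w.toList Rack
  have hB : canBuild Rack w = true ↔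
      ∀ c ∈ w.toList, w.toList.count c ≤ Rack.count (String.singleton c) := by
    simp only [canBuild, List.all_eq_true, decide_eq_true_eq, PySem.Set.mem_ofList]
  have : wordMake Rack w = true ↔ canBuild Rack w = true := by
    rw [wordMake, hA, counts_iff_perLetter, hB]
  cases h1 : wordMake Rack w <;> cases h2 : canBuild Rack w <;> simp_all

theorem main_eq (Rack : List String) (dictionary : List String) :
    scoreListHelper Rack dictionary = scoreListHelper_alt Rack dictionary := by
  induction dictionary with
  | nil => simp [scoreListHelper, scoreListHelper_alt]
  | cons x rest ih =>
    by_cases hR : Rack = []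
    · simp [scoreListHelper, scoreListHelper_alt, hR]
    · rw [scoreListHelper, scoreListHelper_alt, if_neg hR, if_neg hR, List.filterMap_cons]
      rw [wordMake_eq_canBuild, wordScore_eq_alt]
      rw [scoreListHelper_alt, if_neg hR] at ih
      cases h : canBuild Rack x <;> simp [ih]

-- ===== VERDICT (by name: the statement is the Claim_ definition above) =====
theorem scoreListHelper_spec : Claim_equal_scoreListHelper := by
  intro Rack dictionary _ _
  unfold Spec_scoreListHelper
  exact main_eq Rack dictionary
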